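-- pv_equiv track=rewrite | github.com/All-Hands-AI/OpenHands | openhands/runtime/utils/apply_patch.py | identify_files_needed
-- ===== SOURCE A (Python) =====
-- def identify_files_needed(text: str) -> list[str]:
--     lines = text.splitlines()
--     return [
--         line[len('*** Update File: ') :]
--         for line in lines
--         if line.startswith('*** Update File: ')
--     ] + [
--         line[len('*** Delete File: ') :]
--         for line in lines
--         if line.startswith('*** Delete File: ')
--     ]
-- ===== SOURCE B (Python) =====
-- _PREFIXES = ('*** Update File: ', '*** Delete File: ')
--
-- def identify_files_needed(text: str) -> list[str]:
--     # One tagging pass: collect (tag, filename) for matching lines, then a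
--     # stable sort on the tag puts all updates (tag 0) before all deletes (tag 1).
--     tagged = []
--     for line in text.splitlines():
--         for tag, prefix in enumerate(_PREFIXES):
--             if line.startswith(prefix):
--                 tagged.append((tag, line[len(prefix):]))
--     return [name for _, name in sorted(tagged, key=lambda t: t[0])]
-- ===== Notes on version B (the rewrite author's own statement) =====
-- stated objective: alternative
-- what changed: Instead of two filtering comprehensions concatenated, B makes one tagging pass collecting (tag, name) pairs for matching lines and recovers the updates-then-deletes order with a stable sort on the tag.
import Mathlib
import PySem

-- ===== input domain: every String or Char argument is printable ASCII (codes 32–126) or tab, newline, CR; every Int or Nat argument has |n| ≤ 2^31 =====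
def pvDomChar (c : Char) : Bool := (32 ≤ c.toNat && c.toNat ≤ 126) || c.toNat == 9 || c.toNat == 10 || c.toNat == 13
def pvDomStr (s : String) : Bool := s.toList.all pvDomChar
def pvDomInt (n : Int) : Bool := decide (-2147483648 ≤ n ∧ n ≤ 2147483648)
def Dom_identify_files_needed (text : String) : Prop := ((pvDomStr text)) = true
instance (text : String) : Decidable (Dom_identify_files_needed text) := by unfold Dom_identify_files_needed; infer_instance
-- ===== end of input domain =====

-- B replaces A's two filtering comprehensions with a tag-and-stable-sort pass: one pass collects (tag, name) pairs, a stable sort on the tag restores updates-before-deletes; same output.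


-- ===== PORT A =====
-- A: two comprehensions over splitlines (filter by prefix, strip it via slice), Updates ++ Deletes.
def identify_files_needed (text : String) : List String :=
  let lines := PySem.Str.splitlines text
  ((lines.filter (fun line => PySem.Str.startswith line "*** Update File: ")).map
      (fun line => PySem.Str.slice line (some (PySem.Str.len "*** Update File: ")) none))
  ++
  ((lines.filter (fun line => PySem.Str.startswith line "*** Delete File: ")).map
      (fun line => PySem.Str.slice line (some (PySem.Str.len "*** Delete File: ")) none))

-- ===== PORT B =====
-- B: one tagging pass over splitlines (enumerate the two prefixes, append (tag, stripped name)
-- for each match), then a stable sort by tag and a projection to the names.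
def pvPrefixes : List String := ["*** Update File: ", "*** Delete File: "]

def pvTagLine (acc : List (Int × String)) (line : String) : List (Int × String) :=
  (PySem.List.enumerate pvPrefixes).foldl
    (fun acc2 tp =>
      if PySem.Str.startswith line tp.2 then
        acc2 ++ [(tp.1, PySem.Str.slice line (some (PySem.Str.len tp.2)) none)]
      else acc2) acc

def identify_files_needed_alt (text : String) : List String :=
  let tagged := (PySem.Str.splitlines text).foldl pvTagLine []
  (PySem.List.sorted tagged (fun t => t.1) false).map (fun t => t.2)

-- ===== PRECONDITION & SPEC =====
def Spec_identify_files_needed (text : String) (out : List String) : Prop := out = identify_files_needed_alt text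
instance (text : String) (out : List String) : Decidable (Spec_identify_files_needed text out) := by unfold Spec_identify_files_needed; infer_instance

-- ===== CLAIM (what is proved, stated in full; the proofs are below) =====
def Claim_equal_identify_files_needed : Prop := ∀ (text : String), Dom_identify_files_needed text → Spec_identify_files_needed text (identify_files_needed text)

-- ===== LEMMAS AND PROOFS =====
-- what pvTagLine contributes for a single line
def pvTagOne (line : String) : List (Int × String) :=
  (if PySem.Str.startswith line "*** Update File: " then
      [((0 : Int), PySem.Str.slice line (some (PySem.Str.len "*** Update File: ")) none)] else [])
  ++
  (if PySem.Str.startswith line "*** Delete File: " then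
      [((1 : Int), PySem.Str.slice line (some (PySem.Str.len "*** Delete File: ")) none)] else [])

theorem pvTagLine_eq (acc : List (Int × String)) (line : String) :
    pvTagLine acc line = acc ++ pvTagOne line := by
  simp only [pvTagLine, pvPrefixes, PySem.List.enumerate, pvTagOne]
  simp [List.foldl]
  split_ifs <;> simp

theorem pvFoldl_tag (lines : List String) (acc : List (Int × String)) :
    lines.foldl pvTagLine acc = acc ++ lines.flatMap pvTagOne := by
  induction lines generalizing acc with
  | nil => simp
  | cons l ls ih => simp [List.foldl_cons, pvTagLine_eq, ih]

theorem pvTagOne_keys (l : String) : ∀ t ∈ pvTagOne l, t.1 = 0 ∨ t.1 = 1 := by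
  intro t ht
  simp only [pvTagOne, List.mem_append] at ht
  rcases ht with h | h <;> (split at h <;> simp_all)

theorem pvInsertBy_key0 (x : Int × String) (h0 : x.1 = 0) (A B : List (Int × String))
    (hA : ∀ a ∈ A, a.1 = 0) (hB : ∀ b ∈ B, b.1 = 1) :
    PySem.List.insertBy (fun a b => decide (a.1 < b.1)) x (A ++ B) = A ++ x :: B := by
  induction A with
  | nil =>
    cases B with
    | nil => simp [PySem.List.insertBy]
    | cons b bs =>
      have hb : b.1 = 1 := hB b (by simp)
      simp [PySem.List.insertBy, h0, hb]
  | cons a as ih =>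
    have ha : a.1 = 0 := hA a (by simp)
    have := ih (fun a' h => hA a' (by simp [h]))
    simp [PySem.List.insertBy, h0, ha, this]

theorem pvInsertBy_key1 (x : Int × String) (h1 : x.1 = 1) (C : List (Int × String))
    (hC : ∀ c ∈ C, c.1 = 0 ∨ c.1 = 1) :
    PySem.List.insertBy (fun a b => decide (a.1 < b.1)) x C = C ++ [x] := by
  apply PySem.List.insertBy_of_forall_not_before
  intro y hy
  rcases hC y hy with h | h <;> simp [h1, h]

theorem pvPartition (xs : List (Int × String)) : ∀ (A B : List (Int × String)),
    (∀ t ∈ xs, t.1 = 0 ∨ t.1 = 1) → (∀ a ∈ A, a.1 = 0) → (∀ b ∈ B, b.1 = 1) →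
    xs.foldl (fun acc x => PySem.List.insertBy (fun a b => decide (a.1 < b.1)) x acc) (A ++ B)
      = (A ++ xs.filter (fun t => t.1 == 0)) ++ (B ++ xs.filter (fun t => t.1 == 1)) := by
  induction xs with
  | nil => intro A B _ _ _; simp
  | cons x xs ih =>
    intro A B hxs hA hB
    have hx := hxs x (by simp)
    simp only [List.foldl_cons, List.filter_cons]
    rcases hx with h0 | h1
    · rw [pvInsertBy_key0 x h0 A B hA hB]
      have : A ++ x :: B = (A ++ [x]) ++ B := by simp
      rw [this, ih (A ++ [x]) B (fun t ht => hxs t (by simp [ht]))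
            (by intro a ha; rcases List.mem_append.1 ha with h | h
                · exact hA a h
                · simpa using (List.mem_singleton.1 h) ▸ h0) hB]
      simp [h0]
    · have hC : ∀ c ∈ A ++ B, c.1 = 0 ∨ c.1 = 1 := by
        intro c hc; rcases List.mem_append.1 hc with h | h
        · exact Or.inl (hA c h)
        · exact Or.inr (hB c h)
      rw [pvInsertBy_key1 x h1 (A ++ B) hC]
      have : (A ++ B) ++ [x] = A ++ (B ++ [x]) := by simp
      rw [this, ih A (B ++ [x]) (fun t ht => hxs t (by simp [ht])) hA
            (by intro b hb; rcases List.mem_append.1 hb with h | h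
                · exact hB b h
                · simpa using (List.mem_singleton.1 h) ▸ h1)]
      simp [h1]

theorem pvSorted_tag (xs : List (Int × String)) (h : ∀ t ∈ xs, t.1 = 0 ∨ t.1 = 1) :
    PySem.List.sorted xs (fun t => t.1) false
      = xs.filter (fun t => t.1 == 0) ++ xs.filter (fun t => t.1 == 1) := by
  rw [PySem.List.sorted_eq_foldl_insertBy]
  have := pvPartition xs [] [] h (by simp) (by simp)
  simpa using this

theorem pvMapSnd_filter0 (lines : List String) :
    (((lines.flatMap pvTagOne).filter (fun t => t.1 == 0)).map (fun t => t.2))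
      = (lines.filter (fun line => PySem.Str.startswith line "*** Update File: ")).map
          (fun line => PySem.Str.slice line (some (PySem.Str.len "*** Update File: ")) none) := by
  induction lines with
  | nil => simp
  | cons l ls ih =>
    simp only [List.flatMap_cons, List.filter_append, List.map_append, List.filter_cons, ih,
      pvTagOne]
    split_ifs <;> simp_all

theorem pvMapSnd_filter1 (lines : List String) :
    (((lines.flatMap pvTagOne).filter (fun t => t.1 == 1)).map (fun t => t.2))
      = (lines.filter (fun line => PySem.Str.startswith line "*** Delete File: ")).map
          (fun line => PySem.Str.slice line (some (PySem.Str.len "*** Delete File: ")) none) := by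
  induction lines with
  | nil => simp
  | cons l ls ih =>
    simp only [List.flatMap_cons, List.filter_append, List.map_append, List.filter_cons, ih,
      pvTagOne]
    split_ifs <;> simp_all

-- ===== VERDICT (by name: the statement is the Claim_ definition above) =====
theorem identify_files_needed_spec : Claim_equal_identify_files_needed := by
  intro text _
  unfold Spec_identify_files_needed identify_files_needed identify_files_needed_alt
  dsimp only
  rw [pvFoldl_tag, List.nil_append,
    pvSorted_tag _ (by intro t ht
                       rcases List.mem_flatMap.1 ht with ⟨l, _, htl⟩
                       exact pvTagOne_keys l t htl),
    List.map_append, pvMapSnd_filter0, pvMapSnd_filter1]
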